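-- pv_equiv track=rewrite | github.com/AlexNoske/PolyFind | PolyFind.py | polyNU5
-- ===== SOURCE A (Python) =====
-- def polyNU5(noNodesG1,noNodesG2):
--     constraints=[]
--     constraint="cnf(sml,axiom,t(Y,X,X,X,X)=X"
--     if (noNodesG2<noNodesG1):
--         for i in range(noNodesG2,noNodesG1):
--             constraint = constraint + "|X=" + str(i)
--     elif (noNodesG1<noNodesG2):
--         for i in range(noNodesG1,noNodesG2):
--             constraint = constraint + "|X=" + str(i)
--     constraint = constraint + ").\n"
--     constraints.append(constraint)
--     constraint="cnf(sml,axiom,t(X,Y,X,X,X)=X"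
--     if (noNodesG2<noNodesG1):
--         for i in range(noNodesG2,noNodesG1):
--             constraint = constraint + "|X=" + str(i)
--     elif (noNodesG1<noNodesG2):
--         for i in range(noNodesG1,noNodesG2):
--             constraint = constraint + "|X=" + str(i)
--     constraint = constraint + ").\n"
--     constraints.append(constraint)
--     constraint="cnf(sml,axiom,t(X,X,Y,X,X)=X"
--     if (noNodesG2<noNodesG1):
--         for i in range(noNodesG2,noNodesG1):
--             constraint = constraint + "|X=" + str(i)
--     elif (noNodesG1<noNodesG2):
--         for i in range(noNodesG1,noNodesG2):
--             constraint = constraint + "|X=" + str(i)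
--     constraint = constraint + ").\n"
--     constraints.append(constraint)
--     constraint="cnf(sml,axiom,t(X,X,X,Y,X)=X"
--     if (noNodesG2<noNodesG1):
--         for i in range(noNodesG2,noNodesG1):
--             constraint = constraint + "|X=" + str(i)
--     elif (noNodesG1<noNodesG2):
--         for i in range(noNodesG1,noNodesG2):
--             constraint = constraint + "|X=" + str(i)
--     constraint = constraint + ").\n"
--     constraints.append(constraint)
--     constraint="cnf(sml,axiom,t(X,X,X,X,Y)=X"
--     if (noNodesG2<noNodesG1):
--         for i in range(noNodesG2,noNodesG1):
--             constraint = constraint + "|X=" + str(i)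
--     elif (noNodesG1<noNodesG2):
--         for i in range(noNodesG1,noNodesG2):
--             constraint = constraint + "|X=" + str(i)
--     constraint = constraint + ").\n"
--     constraints.append(constraint)
--     return constraints
-- ===== SOURCE B (Python) =====
-- def polyNU5(noNodesG1, noNodesG2):
--     # build the "|X=i" tail back to front, prepending as we count down
--     lo, hi = min(noNodesG1, noNodesG2), max(noNodesG1, noNodesG2)
--     s = ''
--     for i in range(hi - 1, lo - 1, -1):
--         s = '|X=' + str(i) + s
--     out = []
--     for k in range(5):
--         head = 'cnf(sml,axiom,t(' + ','.join('Y' if j == k else 'X' for j in range(5)) + ')=X'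
--         out.append(head + s + ').\n')
--     return out
-- ===== Notes on version B (the rewrite author's own statement) =====
-- stated objective: alternative
-- what changed: A's five copy-pasted if/elif forward range-accumulation blocks become one back-to-front prepend loop over range(hi-1, lo-1, -1) computing the shared suffix once, plus a loop that GENERATES each head template (','.join of Y/X per position) instead of hard-coding five accumulation blocks.
import Mathlib
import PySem

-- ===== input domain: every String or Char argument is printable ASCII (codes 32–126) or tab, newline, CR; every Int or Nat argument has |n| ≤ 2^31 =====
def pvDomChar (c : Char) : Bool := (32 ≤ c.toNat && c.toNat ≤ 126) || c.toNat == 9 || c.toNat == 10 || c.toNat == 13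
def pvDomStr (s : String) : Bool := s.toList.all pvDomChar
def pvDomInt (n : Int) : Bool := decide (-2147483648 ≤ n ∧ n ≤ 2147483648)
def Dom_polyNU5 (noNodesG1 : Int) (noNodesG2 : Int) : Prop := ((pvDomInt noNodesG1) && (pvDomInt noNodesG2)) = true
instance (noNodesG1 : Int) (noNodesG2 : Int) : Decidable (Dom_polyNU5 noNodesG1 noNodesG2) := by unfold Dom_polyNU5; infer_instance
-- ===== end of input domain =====

-- B builds the "|X=i" suffix once, back to front over a countdown range, and
-- generates each head template programmatically, instead of A's five copy-pasted if/elif range loops.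


-- ===== PORT A =====
def polyNU5 (noNodesG1 : Int) (noNodesG2 : Int) : List String :=
  let constraints : List String := []
  let constraint := "cnf(sml,axiom,t(Y,X,X,X,X)=X"
  let constraint :=
    if noNodesG2 < noNodesG1 then
      (PySem.List.pyRange noNodesG2 noNodesG1 1).foldl (fun s i => s ++ "|X=" ++ PySem.Int.toStr i) constraint
    else if noNodesG1 < noNodesG2 then
      (PySem.List.pyRange noNodesG1 noNodesG2 1).foldl (fun s i => s ++ "|X=" ++ PySem.Int.toStr i) constraint
    else constraint
  let constraint := constraint ++ ").\n"
  let constraints := constraints ++ [constraint]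
  let constraint := "cnf(sml,axiom,t(X,Y,X,X,X)=X"
  let constraint :=
    if noNodesG2 < noNodesG1 then
      (PySem.List.pyRange noNodesG2 noNodesG1 1).foldl (fun s i => s ++ "|X=" ++ PySem.Int.toStr i) constraint
    else if noNodesG1 < noNodesG2 then
      (PySem.List.pyRange noNodesG1 noNodesG2 1).foldl (fun s i => s ++ "|X=" ++ PySem.Int.toStr i) constraint
    else constraint
  let constraint := constraint ++ ").\n"
  let constraints := constraints ++ [constraint]
  let constraint := "cnf(sml,axiom,t(X,X,Y,X,X)=X"
  let constraint :=
    if noNodesG2 < noNodesG1 then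
      (PySem.List.pyRange noNodesG2 noNodesG1 1).foldl (fun s i => s ++ "|X=" ++ PySem.Int.toStr i) constraint
    else if noNodesG1 < noNodesG2 then
      (PySem.List.pyRange noNodesG1 noNodesG2 1).foldl (fun s i => s ++ "|X=" ++ PySem.Int.toStr i) constraint
    else constraint
  let constraint := constraint ++ ").\n"
  let constraints := constraints ++ [constraint]
  let constraint := "cnf(sml,axiom,t(X,X,X,Y,X)=X"
  let constraint :=
    if noNodesG2 < noNodesG1 then
      (PySem.List.pyRange noNodesG2 noNodesG1 1).foldl (fun s i => s ++ "|X=" ++ PySem.Int.toStr i) constraint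
    else if noNodesG1 < noNodesG2 then
      (PySem.List.pyRange noNodesG1 noNodesG2 1).foldl (fun s i => s ++ "|X=" ++ PySem.Int.toStr i) constraint
    else constraint
  let constraint := constraint ++ ").\n"
  let constraints := constraints ++ [constraint]
  let constraint := "cnf(sml,axiom,t(X,X,X,X,Y)=X"
  let constraint :=
    if noNodesG2 < noNodesG1 then
      (PySem.List.pyRange noNodesG2 noNodesG1 1).foldl (fun s i => s ++ "|X=" ++ PySem.Int.toStr i) constraint
    else if noNodesG1 < noNodesG2 then
      (PySem.List.pyRange noNodesG1 noNodesG2 1).foldl (fun s i => s ++ "|X=" ++ PySem.Int.toStr i) constraint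
    else constraint
  let constraint := constraint ++ ").\n"
  let constraints := constraints ++ [constraint]
  constraints

-- ===== PORT B =====
-- back-to-front suffix: prepend while counting down (Source B's first loop)
def altSuffix (lo hi : Int) : String :=
  (PySem.List.pyRange (hi - 1) (lo - 1) (-1)).foldl
    (fun s i => "|X=" ++ PySem.Int.toStr i ++ s) ""

def polyNU5_alt (noNodesG1 : Int) (noNodesG2 : Int) : List String :=
  let s := altSuffix (min noNodesG1 noNodesG2) (max noNodesG1 noNodesG2)
  (PySem.List.pyRange 0 5 1).foldl
    (fun out k =>
      let head := "cnf(sml,axiom,t(" ++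
        PySem.Str.join "," ((PySem.List.pyRange 0 5 1).map (fun j => if j == k then "Y" else "X")) ++ ")=X"
      out ++ [head ++ s ++ ").\n"])
    []

-- ===== PRECONDITION & SPEC =====
def Spec_polyNU5 (noNodesG1 : Int) (noNodesG2 : Int) (out : List String) : Prop := out = polyNU5_alt noNodesG1 noNodesG2
instance (noNodesG1 : Int) (noNodesG2 : Int) (out : List String) : Decidable (Spec_polyNU5 noNodesG1 noNodesG2 out) := by unfold Spec_polyNU5; infer_instance

-- ===== CLAIM =====
def Claim_equal_polyNU5 : Prop := ∀ (noNodesG1 : Int) (noNodesG2 : Int), Dom_polyNU5 noNodesG1 noNodesG2 → Spec_polyNU5 noNodesG1 noNodesG2 (polyNU5 noNodesG1 noNodesG2)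

-- ===== LEMMAS AND PROOFS =====

-- forward head-accumulation equals head ++ a foldr of the pieces
theorem foldl_eq_foldr (l : List Int) (head : String) :
    l.foldl (fun s i => s ++ "|X=" ++ PySem.Int.toStr i) head
      = head ++ l.foldr (fun i s => "|X=" ++ PySem.Int.toStr i ++ s) "" := by
  induction l generalizing head with
  | nil => simp
  | cons a t ih =>
      rw [List.foldl_cons, List.foldr_cons, ih]
      simp [String.append_assoc]

-- A's forward accumulation over range(lo,hi) equals B's back-to-front prepend loop, prefixed by the head
theorem fold_eq_altSuffix (lo hi : Int) (head : String) :
    (PySem.List.pyRange lo hi 1).foldl (fun s i => s ++ "|X=" ++ PySem.Int.toStr i) head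
      = head ++ altSuffix lo hi := by
  unfold altSuffix
  rw [PySem.List.pyRange_neg_one_eq_reverse]
  have h1 : lo - 1 + 1 = lo := by ring
  have h2 : hi - 1 + 1 = hi := by ring
  rw [h1, h2, List.foldl_reverse, foldl_eq_foldr]

-- A's if/elif chain equals head ++ altSuffix(min,max)
theorem branch_eq (g1 g2 : Int) (head : String) :
    (if g2 < g1 then
       (PySem.List.pyRange g2 g1 1).foldl (fun s i => s ++ "|X=" ++ PySem.Int.toStr i) head
     else if g1 < g2 then
       (PySem.List.pyRange g1 g2 1).foldl (fun s i => s ++ "|X=" ++ PySem.Int.toStr i) head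
     else head)
      = head ++ altSuffix (min g1 g2) (max g1 g2) := by
  rcases lt_trichotomy g1 g2 with h | h | h
  · rw [if_neg (by omega), if_pos h, fold_eq_altSuffix,
      min_eq_left (le_of_lt h), max_eq_right (le_of_lt h)]
  · subst h
    rw [if_neg (by omega), if_neg (by omega)]
    simp [altSuffix, PySem.List.pyRange_neg_one_eq_nil le_rfl]
  · rw [if_pos h, fold_eq_altSuffix,
      min_eq_right (le_of_lt h), max_eq_left (le_of_lt h)]

-- B's generated heads evaluate to the five literal head strings
theorem alt_eval (g1 g2 : Int) :
    polyNU5_alt g1 g2 =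
      let s := altSuffix (min g1 g2) (max g1 g2)
      [ "cnf(sml,axiom,t(Y,X,X,X,X)=X" ++ s ++ ").\n"
      , "cnf(sml,axiom,t(X,Y,X,X,X)=X" ++ s ++ ").\n"
      , "cnf(sml,axiom,t(X,X,Y,X,X)=X" ++ s ++ ").\n"
      , "cnf(sml,axiom,t(X,X,X,Y,X)=X" ++ s ++ ").\n"
      , "cnf(sml,axiom,t(X,X,X,X,Y)=X" ++ s ++ ").\n" ] := by
  unfold polyNU5_alt
  norm_num [show PySem.List.pyRange 0 5 1 = [0,1,2,3,4] by decide,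
    List.foldl, PySem.Str.join, PySem.Chars.join, List.intercalate]
  decide

-- ===== VERDICT =====
theorem polyNU5_spec : Claim_equal_polyNU5 := by
  intro g1 g2 _
  unfold Spec_polyNU5 polyNU5
  dsimp only
  rw [branch_eq, branch_eq, branch_eq, branch_eq, branch_eq, alt_eval]
  simp
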